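-- pv_equiv track=rewrite | github.com/jemurrayPhD/OrbSim | src/orbsim/orbitals.py | occupied_orbitals
-- ===== SOURCE A (Python) =====
-- _ATOMIC_NUMBER: dict[str, int] = {
--     "H": 1,
--     "He": 2,
--     "Li": 3,
--     "Be": 4,
--     "B": 5,
--     "C": 6,
--     "N": 7,
--     "O": 8,
--     "F": 9,
--     "Ne": 10,
--     "Na": 11,
--     "Mg": 12,
--     "Al": 13,
--     "Si": 14,
--     "P": 15,
--     "S": 16,
--     "Cl": 17,
--     "Ar": 18,
-- }
--
-- def occupied_orbitals(symbol: str) -> list[tuple[int, int, int]]: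
--     """Return (n,l,m) orbitals occupied for a neutral atom up to Ar (3p)."""
--     electrons = _ATOMIC_NUMBER.get(symbol, 1)
--     sequence: list[tuple[int, int, int]] = []
--     filling_order = [(1, 0), (2, 0), (2, 1), (3, 0), (3, 1)]
--     for n, l in filling_order:
--         for m in range(-l, l + 1):
--             if electrons <= 0:
--                 break
--             sequence.append((n, l, m))
--             electrons -= min(2, electrons)
--         if electrons <= 0:
--             break
--     return sequence
-- ===== SOURCE B (Python) =====
-- _ATOMIC_NUMBER: dict[str, int] = {
--     "H": 1, "He": 2, "Li": 3, "Be": 4, "B": 5, "C": 6, "N": 7, "O": 8,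
--     "F": 9, "Ne": 10, "Na": 11, "Mg": 12, "Al": 13, "Si": 14, "P": 15,
--     "S": 16, "Cl": 17, "Ar": 18,
-- }
--
-- # Full ordered table of the 9 orbitals for filling order 1s, 2s, 2p, 3s, 3p.
-- _ORBITALS: list[tuple[int, int, int]] = [
--     (n, l, m)
--     for n, l in [(1, 0), (2, 0), (2, 1), (3, 0), (3, 1)]
--     for m in range(-l, l + 1)
-- ]
--
-- def occupied_orbitals(symbol: str) -> list[tuple[int, int, int]]:
--     """Return (n,l,m) orbitals occupied for a neutral atom up to Ar (3p)."""
--     electrons = _ATOMIC_NUMBER.get(symbol, 1)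
--     count = (electrons + 1) // 2
--     return _ORBITALS[:count]
-- ===== Notes on version B (the rewrite author's own statement) =====
-- stated objective: simpler
-- what changed: Replaces the nested loop with break-based electron depletion by a closed-form occupied-orbital count (electrons+1)//2 and a single slice of a prebuilt 9-orbital table.
import Mathlib
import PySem

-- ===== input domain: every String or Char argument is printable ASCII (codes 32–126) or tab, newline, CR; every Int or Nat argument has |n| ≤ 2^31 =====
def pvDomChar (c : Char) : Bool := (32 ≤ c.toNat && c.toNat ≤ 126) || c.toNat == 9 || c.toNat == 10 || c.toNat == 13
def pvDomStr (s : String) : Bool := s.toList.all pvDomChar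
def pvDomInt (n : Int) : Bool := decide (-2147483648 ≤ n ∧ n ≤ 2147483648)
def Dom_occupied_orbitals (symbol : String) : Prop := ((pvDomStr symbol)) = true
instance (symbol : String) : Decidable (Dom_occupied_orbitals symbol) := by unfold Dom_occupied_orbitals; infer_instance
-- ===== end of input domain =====

-- B replaces A's nested break-based electron-depletion loop by a closed-form count
-- (electrons+1)//2 and a single slice of a prebuilt orbital table (simpler).


-- ===== PORT A =====
-- _ATOMIC_NUMBER (module constant, shared by both sources)
def atomicNumberDict : PySem.Dict String Int :=
  PySem.Dict.ofList [("H",1),("He",2),("Li",3),("Be",4),("B",5),("C",6),("N",7),("O",8),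
    ("F",9),("Ne",10),("Na",11),("Mg",12),("Al",13),("Si",14),("P",15),("S",16),("Cl",17),("Ar",18)]

-- inner 'for m in range(-l, l+1): if electrons <= 0: break; …'
def ooInner (n l : Int) (ms : List Int) (seq : List (Int × Int × Int)) (e : Int) :
    List (Int × Int × Int) × Int :=
  match ms with
  | [] => (seq, e)
  | m :: rest =>
    if e ≤ 0 then (seq, e)
    else ooInner n l rest (seq ++ [(n, l, m)]) (e - min 2 e)

-- outer 'for n, l in filling_order: …; if electrons <= 0: break'
def ooOuter (fo : List (Int × Int)) (seq : List (Int × Int × Int)) (e : Int) :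
    List (Int × Int × Int) :=
  match fo with
  | [] => seq
  | (n, l) :: rest =>
    let p := ooInner n l (PySem.List.pyRange (-l) (l + 1) 1) seq e
    if p.2 ≤ 0 then p.1 else ooOuter rest p.1 p.2

def occupied_orbitals (symbol : String) : List (Int × Int × Int) :=
  ooOuter [(1,0),(2,0),(2,1),(3,0),(3,1)] [] (atomicNumberDict.getD symbol 1)

-- ===== PORT B =====
-- _ORBITALS: the full ordered table (the comprehension over the filling order, evaluated once)
def orbitalTable : List (Int × Int × Int) :=
  ([((1:Int),(0:Int)),(2,0),(2,1),(3,0),(3,1)]).flatMap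
    (fun p => (PySem.List.pyRange (-p.2) (p.2 + 1) 1).map (fun m => (p.1, p.2, m)))

def occupied_orbitals_alt (symbol : String) : List (Int × Int × Int) :=
  let electrons := atomicNumberDict.getD symbol 1
  let count := PySem.Int.floordiv (electrons + 1) 2
  PySem.List.slice orbitalTable none (some count)

-- ===== PRECONDITION & SPEC =====
def Spec_occupied_orbitals (symbol : String) (out : List (Int × Int × Int)) : Prop := out = occupied_orbitals_alt symbol
instance (symbol : String) (out : List (Int × Int × Int)) : Decidable (Spec_occupied_orbitals symbol out) := by unfold Spec_occupied_orbitals; infer_instance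

-- ===== CLAIM (what is proved, stated in full; the proofs are below) =====
def Claim_equal_occupied_orbitals : Prop := ∀ (symbol : String), Dom_occupied_orbitals symbol → Spec_occupied_orbitals symbol (occupied_orbitals symbol)

-- ===== LEMMAS AND PROOFS =====

-- _ATOMIC_NUMBER.get(symbol, 1) is always one of the 18 atomic numbers or the default 1.
theorem atomicNumber_bounds (s : String) :
    1 ≤ atomicNumberDict.getD s 1 ∧ atomicNumberDict.getD s 1 ≤ 18 := by
  rw [PySem.Dict.getD_eq_get?_getD]
  cases hv : atomicNumberDict.get? s with
  | none => simp
  | some v =>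
    have hm := PySem.Dict.mem_items_of_get?_eq_some _ hv
    have hit : atomicNumberDict.items =
        [("H",1),("He",2),("Li",3),("Be",4),("B",5),("C",6),("N",7),("O",8),("F",9),
         ("Ne",10),("Na",11),("Mg",12),("Al",13),("Si",14),("P",15),("S",16),("Cl",17),("Ar",18)] := by rfl
    rw [hit] at hm
    simp only [List.mem_cons, List.not_mem_nil, or_false, Prod.mk.injEq] at hm
    rcases hm with ⟨_,h⟩|⟨_,h⟩|⟨_,h⟩|⟨_,h⟩|⟨_,h⟩|⟨_,h⟩|⟨_,h⟩|⟨_,h⟩|⟨_,h⟩|⟨_,h⟩|⟨_,h⟩|⟨_,h⟩|⟨_,h⟩|⟨_,h⟩|⟨_,h⟩|⟨_,h⟩|⟨_,h⟩|⟨_,h⟩ <;>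
      subst h <;> simp

-- For every admissible electron count, A's depletion loop yields exactly the first
-- ceil(e/2) entries of the table.
theorem loop_eq_slice (e : Int) (h1 : 1 ≤ e) (h2 : e ≤ 18) :
    ooOuter [(1,0),(2,0),(2,1),(3,0),(3,1)] [] e =
      PySem.List.slice orbitalTable none (some (PySem.Int.floordiv (e + 1) 2)) := by
  interval_cases e <;> rfl

-- ===== VERDICT (by name: the statement is the Claim_ definition above) =====
theorem occupied_orbitals_spec : Claim_equal_occupied_orbitals := by
  intro symbol _
  unfold Spec_occupied_orbitals occupied_orbitals occupied_orbitals_alt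
  obtain ⟨h1, h2⟩ := atomicNumber_bounds symbol
  exact loop_eq_slice _ h1 h2
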